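-- pv_equiv track=rewrite | github.com/DazedtilDawn/operators-edge | tools/proof_viz_builders.py | compute_nebula_clusters
-- ===== SOURCE A (Python) =====
-- from typing import List, Dict, Any
--
-- def compute_nebula_clusters(nodes: List[Dict], edges: List[Dict], min_cluster_size: int = 3) -> Dict[str, int]:
--     """
--     Compute directory clusters.
--     Returns mapping of node_id -> cluster_id.
--
--     Files in the same directory belong to the same cluster.
--     Small clusters (< min_cluster_size) are assigned to cluster -1 (unclustered).
--     """
--     if not nodes:
--         return {}
--
--     # Group nodes by directory
--     dir_groups = {}
--     for node in nodes:
--         # Extract directory from node path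
--         node_id = node.get('id', '')
--         # node_id format: "path/to/file.py" - get directory
--         if '/' in node_id:
--             directory = '/'.join(node_id.split('/')[:-1]) or 'root'
--         else:
--             directory = 'root'
--
--         if directory not in dir_groups:
--             dir_groups[directory] = []
--         dir_groups[directory].append(node_id)
--
--     # Assign cluster IDs, filtering small clusters
--     cluster_id_map = {}
--     cluster_id = 0
--
--     # Sort directories by size (largest first) for consistent coloring
--     sorted_dirs = sorted(dir_groups.items(), key=lambda x: len(x[1]), reverse=True)
--
--     for directory, node_ids in sorted_dirs:
--         if len(node_ids) >= min_cluster_size: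
--             for nid in node_ids:
--                 cluster_id_map[nid] = cluster_id
--             cluster_id += 1
--         else:
--             # Small clusters get -1 (unclustered)
--             for nid in node_ids:
--                 cluster_id_map[nid] = -1
--
--     return cluster_id_map
-- ===== SOURCE B (Python) =====
-- def compute_nebula_clusters(nodes, edges, min_cluster_size=3):
--     """Alternative decomposition: count directory sizes (no member lists), then
--     emit the result per sorted directory by re-scanning the id list."""
--     def _dir(nid):
--         return ('/'.join(nid.split('/')[:-1]) or 'root') if '/' in nid else 'root'
--
--     ids = [node.get('id', '') for node in nodes]
--     counts = {}
--     for nid in ids: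
--         counts[_dir(nid)] = counts.get(_dir(nid), 0) + 1
--
--     result = {}
--     next_cid = 0
--     for d, c in sorted(counts.items(), key=lambda kv: kv[1], reverse=True):
--         cid = next_cid if c >= min_cluster_size else -1
--         if c >= min_cluster_size:
--             next_cid += 1
--         for nid in ids:
--             if _dir(nid) == d:
--                 result[nid] = cid
--     return result
-- ===== Notes on version B (the rewrite author's own statement) =====
-- stated objective: alternative
-- what changed: B replaces A's single grouping pass that builds per-directory member lists with a directory counter (sizes only) sorted descending, and produces the output by re-scanning the extracted id list once per surviving directory, fusing cluster-id assignment into the emission loop.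
import Mathlib
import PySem

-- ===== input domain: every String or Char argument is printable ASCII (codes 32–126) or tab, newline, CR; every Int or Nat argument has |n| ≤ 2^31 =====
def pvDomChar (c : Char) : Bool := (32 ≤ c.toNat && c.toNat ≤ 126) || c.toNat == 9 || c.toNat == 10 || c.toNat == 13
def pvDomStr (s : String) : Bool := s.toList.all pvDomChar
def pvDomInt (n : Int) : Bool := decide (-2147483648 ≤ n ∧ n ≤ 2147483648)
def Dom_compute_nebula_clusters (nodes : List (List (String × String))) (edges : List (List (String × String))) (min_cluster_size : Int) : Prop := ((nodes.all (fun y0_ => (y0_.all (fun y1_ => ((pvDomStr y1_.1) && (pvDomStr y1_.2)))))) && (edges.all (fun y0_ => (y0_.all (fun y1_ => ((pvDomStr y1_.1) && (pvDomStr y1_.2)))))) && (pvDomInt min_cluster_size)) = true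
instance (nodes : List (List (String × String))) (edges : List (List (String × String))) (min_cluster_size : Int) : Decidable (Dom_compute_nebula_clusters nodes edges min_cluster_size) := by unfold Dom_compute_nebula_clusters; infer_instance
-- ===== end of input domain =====

-- B replaces A's member-list grouping by a directory Counter and emits the result
-- by re-scanning the id list per sorted directory (alternative decomposition, not faster).

-- shared helper: the directory-extraction expression, textually identical in A and B
-- ('/'.join(nid.split('/')[:-1]) or 'root') if '/' in nid else 'root'
-- (split sep "/" is a nonempty literal, so split? never returns none)
def pvDir (nid : String) : String :=
  if PySem.Str.isIn "/" nid then
    let d := PySem.Str.join "/" (PySem.List.slice ((PySem.Str.split? nid "/").getD []) none (some (-1)))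
    if d = "" then "root" else d
  else "root"

-- ===== PORT A =====
def compute_nebula_clusters (nodes : List (List (String × String))) (edges : List (List (String × String))) (min_cluster_size : Int) : List (String × Int) :=
  if nodes = [] then []
  else
    -- dir_groups[directory] = [] if absent; dir_groups[directory].append(node_id)
    let dir_groups : PySem.Dict String (List String) :=
      nodes.foldl (fun d node =>
        let nid := (PySem.Dict.mk node).getD "id" ""
        d.modify (pvDir nid) [] (fun l => l ++ [nid])) PySem.Dict.empty
    let sorted_dirs := PySem.List.sorted dir_groups.items (fun x => PySem.List.len x.2) true
    let fin := sorted_dirs.foldl (fun (st : PySem.Dict String Int × Int) p =>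
        if min_cluster_size ≤ PySem.List.len p.2 then
          (p.2.foldl (fun m nid => m.insert nid st.2) st.1, st.2 + 1)
        else
          (p.2.foldl (fun m nid => m.insert nid (-1)) st.1, st.2)) (PySem.Dict.empty, 0)
    fin.1.items

-- ===== PORT B =====
def compute_nebula_clusters_alt (nodes : List (List (String × String))) (edges : List (List (String × String))) (min_cluster_size : Int) : List (String × Int) :=
  let ids := nodes.map (fun node => (PySem.Dict.mk node).getD "id" "")
  -- counts[_dir(nid)] = counts.get(_dir(nid), 0) + 1
  let counts : PySem.Dict String Int :=
    ids.foldl (fun c nid => c.modify (pvDir nid) 0 (fun n => n + 1)) PySem.Dict.empty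
  let fin := (PySem.List.sorted counts.items (fun kv => kv.2) true).foldl
      (fun (st : PySem.Dict String Int × Int) dc =>
        let cid := if min_cluster_size ≤ dc.2 then st.2 else (-1 : Int)
        let res := ids.foldl (fun r nid => if pvDir nid == dc.1 then r.insert nid cid else r) st.1
        (res, if min_cluster_size ≤ dc.2 then st.2 + 1 else st.2)) (PySem.Dict.empty, 0)
  fin.1.items

-- ===== PRECONDITION & SPEC =====
def Spec_compute_nebula_clusters (nodes : List (List (String × String))) (edges : List (List (String × String))) (min_cluster_size : Int) (out : List (String × Int)) : Prop := out = compute_nebula_clusters_alt nodes edges min_cluster_size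
instance (nodes : List (List (String × String))) (edges : List (List (String × String))) (min_cluster_size : Int) (out : List (String × Int)) : Decidable (Spec_compute_nebula_clusters nodes edges min_cluster_size out) := by unfold Spec_compute_nebula_clusters; infer_instance

-- ===== CLAIM (what is proved, stated in full; the proofs are below) =====
def Claim_equal_compute_nebula_clusters : Prop := ∀ (nodes : List (List (String × String))) (edges : List (List (String × String))) (min_cluster_size : Int), Dom_compute_nebula_clusters nodes edges min_cluster_size → Spec_compute_nebula_clusters nodes edges min_cluster_size (compute_nebula_clusters nodes edges min_cluster_size)

-- ===== LEMMAS AND PROOFS =====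

-- stable insertion respects mapping: inserting f x into a mapped list
theorem pv_insertBy_map {α β : Type} (f : α → β) (cmpA : α → α → Bool) (cmpB : β → β → Bool)
    (h : ∀ a b, cmpB (f a) (f b) = cmpA a b) (x : α) (ys : List α) :
    PySem.List.insertBy cmpB (f x) (ys.map f) = (PySem.List.insertBy cmpA x ys).map f := by
  induction ys with
  | nil => simp [PySem.List.insertBy]
  | cons y ys ih => simp [PySem.List.insertBy, h]; split <;> simp [ih]

-- sorted of a mapped list = map of sorted with the composed key (reverse = true)
theorem pv_sorted_map {α β κ : Type} [LT κ] [DecidableLT κ] (xs : List α) (f : α → β) (key : β → κ) :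
    PySem.List.sorted (xs.map f) key true = (PySem.List.sorted xs (fun x => key (f x)) true).map f := by
  rw [PySem.List.sorted_rev_eq_foldl_insertBy, PySem.List.sorted_rev_eq_foldl_insertBy, List.foldl_map]
  suffices h : ∀ (l : List α) (accA : List α),
      List.foldl (fun acc x => PySem.List.insertBy (fun a b => decide (key b < key a)) (f x) acc) (accA.map f) l
        = (List.foldl (fun acc x => PySem.List.insertBy (fun a b => decide (key (f b) < key (f a))) x acc) accA l).map f by
    simpa using h xs []
  intro l
  induction l with
  | nil => simp
  | cons x l ih =>
    intro accA
    simp only [List.foldl_cons]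
    rw [pv_insertBy_map f _ _ (fun a b => rfl), ih]

-- the items of A's grouping dict: first-seen directories, each with its in-order member list
theorem pv_groups_items (ids : List String) :
    (ids.foldl (fun d nid => d.modify (pvDir nid) [] (fun l => l ++ [nid])) PySem.Dict.empty).items
      = (PySem.Set.ofList (ids.map pvDir)).map
          (fun dir => (dir, ids.filter (fun nid => pvDir nid == dir))) := by
  set G := ids.foldl (fun d nid => d.modify (pvDir nid) [] (fun l => l ++ [nid])) PySem.Dict.empty with hG
  have hkeys : G.keys = PySem.Set.ofList (ids.map pvDir) := by
    rw [hG, PySem.Dict.keys_foldl_modify_key ids pvDir [] (fun _ nid => fun l => l ++ [nid])]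
    simp [PySem.Dict.keys_empty, PySem.Set.update, PySem.Set.ofList_eq_foldl]
  have hnd : G.keys.Nodup := by
    rw [hG]
    exact PySem.Dict.nodup_keys_foldl_modify_key ids pvDir [] (fun _ nid => fun l => l ++ [nid]) _
      PySem.Dict.nodup_keys_empty
  have hgetD : ∀ c, G.getD c [] = ids.filter (fun nid => pvDir nid == c) := by
    intro c
    have : G = (ids.map (fun nid => (pvDir nid, nid))).foldl
        (fun d p => d.modify p.1 [] (fun l => l ++ [p.2])) PySem.Dict.empty := by
      rw [hG, List.foldl_map]
    rw [this, PySem.Dict.getD_foldl_modify_append]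
    simp [List.filter_map, List.map_map, Function.comp_def]
  rw [PySem.Dict.items_eq_map_keys G hnd [], hkeys]
  exact List.map_congr_left (fun d _ => by rw [hgetD d])

-- B's counting loop is Counter(dirs)
theorem pv_counts_items (ids : List String) :
    (ids.foldl (fun c nid => c.modify (pvDir nid) 0 (fun n => n + 1)) PySem.Dict.empty).items
      = (PySem.Set.ofList (ids.map pvDir)).map
          (fun dir => (dir, ((ids.map pvDir).count dir : Int))) := by
  have : (ids.foldl (fun c nid => c.modify (pvDir nid) 0 (fun n => n + 1)) PySem.Dict.empty)
      = PySem.Dict.counter (ids.map pvDir) := by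
    rw [PySem.Dict.counter_eq_foldl, List.foldl_map]
  rw [this, PySem.Dict.items_counter]

-- each directory's group size is its count among the extracted directories
theorem pv_len_group (ids : List String) (d : String) :
    PySem.List.len (ids.filter (fun nid => pvDir nid == d)) = ((ids.map pvDir).count d : Int) := by
  simp only [PySem.List.len_eq, List.count, List.countP_eq_length_filter, List.filter_map,
    List.length_map, Function.comp_def]

-- the two programs agree
theorem pv_main (nodes : List (List (String × String))) (edges : List (List (String × String)))
    (m : Int) : compute_nebula_clusters nodes edges m = compute_nebula_clusters_alt nodes edges m := by
  by_cases hn : nodes = []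
  · subst hn; rfl
  · unfold compute_nebula_clusters compute_nebula_clusters_alt
    rw [if_neg hn]
    set ids := nodes.map (fun node => (PySem.Dict.mk node).getD "id" "") with hids
    have hfoldn : nodes.foldl (fun d node =>
        d.modify (pvDir ((PySem.Dict.mk node).getD "id" "")) [] (fun l => l ++ [(PySem.Dict.mk node).getD "id" ""]))
        PySem.Dict.empty
        = ids.foldl (fun d nid => d.modify (pvDir nid) [] (fun l => l ++ [nid])) PySem.Dict.empty := by
      rw [hids, List.foldl_map]
    simp only [hfoldn, pv_groups_items, pv_counts_items]
    set L := PySem.Set.ofList (ids.map pvDir) with hL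
    set g := fun dir => ids.filter (fun nid => pvDir nid == dir) with hg
    set k := fun dir => (((ids.map pvDir).count dir : Int)) with hk
    rw [pv_sorted_map L (fun dir => (dir, g dir)) (fun x => PySem.List.len x.2),
        pv_sorted_map L (fun dir => (dir, k dir)) (fun kv => kv.2)]
    have hkey : (fun x => PySem.List.len ((fun dir => (dir, g dir)) x).2) = (fun x => ((fun dir => (dir, k dir)) x).2) := by
      funext d; simpa [hg, hk] using pv_len_group ids d
    rw [hkey]
    set S := PySem.List.sorted L (fun x => ((fun dir => (dir, k dir)) x).2) true with hS
    rw [List.foldl_map, List.foldl_map]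
    have hinner : ∀ (r : PySem.Dict String Int) (d : String) (cid : Int),
        ids.foldl (fun r nid => if pvDir nid == d then r.insert nid cid else r) r
        = (g d).foldl (fun mm nid => mm.insert nid cid) r := by
      intro r d cid; rw [hg]; simp [List.foldl_filter]
    have hlg : ∀ d, PySem.List.len (g d) = k d := fun d => by
      simpa [hg, hk] using pv_len_group ids d
    have hstep : ∀ (st : PySem.Dict String Int × Int) (d : String),
        (if m ≤ PySem.List.len (g d) then ((g d).foldl (fun mm nid => mm.insert nid st.2) st.1, st.2 + 1)
         else ((g d).foldl (fun mm nid => mm.insert nid (-1)) st.1, st.2))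
        = (ids.foldl (fun r nid => if pvDir nid == d then r.insert nid (if m ≤ k d then st.2 else (-1 : Int)) else r) st.1,
           if m ≤ k d then st.2 + 1 else st.2) := by
      intro st d
      rw [hlg d, hinner st.1 d (if m ≤ k d then st.2 else (-1 : Int))]
      by_cases hc : m ≤ k d <;> simp [hc]
    simp only [hstep]

-- ===== VERDICT (by name: the statement is the Claim_ definition above) =====
theorem compute_nebula_clusters_spec : Claim_equal_compute_nebula_clusters := by
  intro nodes edges m _
  unfold Spec_compute_nebula_clusters
  exact pv_main nodes edges m
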